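-- pv_equiv track=rewrite | github.com/kristomu/flux-analyze | python/approx_search.py | get_corruptions
-- ===== SOURCE A (Python) =====
-- def get_substitution_corruptions(in_list, substitutions, pos, maxpos, out_dict):
-- 	if pos == min(maxpos, len(in_list)) or substitutions == 0:
-- 		out_dict[tuple(in_list)] = True
-- 		return
--
-- 	original_value = in_list[pos]
--
-- 	for i in range(-1, 3):
-- 		if i == -1:
-- 			get_substitution_corruptions(in_list, substitutions,
-- 				pos+1, maxpos, out_dict)
-- 		else:
-- 			# Don't recurse more than needed.
-- 			if i == original_value:
-- 				continue
--
-- 			in_list[pos] = i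
-- 			get_substitution_corruptions(in_list, substitutions-1,
-- 				pos+1, maxpos, out_dict)
--
-- 	in_list[pos] = original_value
--
-- def get_insert_corruptions(in_list, num_inserts, pos, maxpos,
-- 	out_dict):
--
-- 	if num_inserts == 0 or pos == min(maxpos, len(in_list)):
-- 		out_dict[tuple(in_list)] = True
-- 		return
--
-- 	get_insert_corruptions(in_list, num_inserts, pos+1, maxpos, out_dict)
--
-- 	for i in range(3):
--             get_insert_corruptions(in_list[:pos] + [i] + in_list[pos:],
--                         num_inserts-1, pos+1, maxpos, out_dict)
--
-- def get_delete_corruptions(in_list, num_deletions, pos, maxpos, out_dict):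
-- 	if num_deletions == 0 or pos == min(maxpos, len(in_list)):
-- 		out_dict[tuple(in_list)] = True
-- 		return
--
-- 	get_delete_corruptions(in_list, num_deletions, pos+1, maxpos, out_dict)
-- 	get_delete_corruptions(in_list[:pos] + in_list[pos+1:], num_deletions-1, pos, maxpos, out_dict)
--
-- def get_corruptions(needle, num_substs, num_inserts, num_deletes):
--
-- 	out = [{}, {}, {}]
--
-- 	get_substitution_corruptions(needle, num_substs, 0, len(needle),
-- 		out[0])
--
-- 	for corrupted_needle in out[0].keys():
-- 		get_insert_corruptions(list(corrupted_needle), num_inserts, 0,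
-- 			len(corrupted_needle), out[1])
--
-- 	for corrupted_needle in out[1].keys():
-- 		get_delete_corruptions(list(corrupted_needle), num_deletes, 0,
-- 			len(corrupted_needle), out[2])
--
-- 	return out[2]
-- ===== SOURCE B (Python) =====
-- # B: explicit stack/worklist DFS per phase instead of mutating recursion; dedup via dict.fromkeys.
-- def _dfs(seq, budget, children):
--     maxpos = len(seq)
--     stack = [(tuple(seq), budget, 0)]
--     out = []
--     while stack:
--         s, b, pos = stack.pop()
--         if b == 0 or pos == min(maxpos, len(s)):
--             out.append(s)
--         else:
--             stack.extend(reversed(children(s, b, pos)))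
--     return out
--
-- def _sub_children(s, b, pos):
--     kids = [(s, b, pos + 1)]
--     for i in range(3):
--         if i != s[pos]:
--             kids.append((s[:pos] + (i,) + s[pos+1:], b - 1, pos + 1))
--     return kids
--
-- def _ins_children(s, b, pos):
--     kids = [(s, b, pos + 1)]
--     for i in range(3):
--         kids.append((s[:pos] + (i,) + s[pos:], b - 1, pos + 1))
--     return kids
--
-- def _del_children(s, b, pos):
--     return [(s, b, pos + 1), (s[:pos] + s[pos+1:], b - 1, pos)]
--
-- def get_corruptions(needle, num_substs, num_inserts, num_deletes):
--     subs = list(dict.fromkeys(_dfs(needle, num_substs, _sub_children)))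
--     ins = list(dict.fromkeys(t for s in subs for t in _dfs(s, num_inserts, _ins_children)))
--     dels = list(dict.fromkeys(t for s in ins for t in _dfs(s, num_deletes, _del_children)))
--     return {t: True for t in dels}
-- ===== Notes on version B (the rewrite author's own statement) =====
-- stated objective: alternative
-- what changed: Each of A's three dict-mutating recursive enumerators (which thread a shared out_dict and mutate/restore in_list in place) is replaced by an explicit stack/worklist loop that pops a (sequence, budget, pos) state, emits it when budget==0 or pos==min(maxpos,len), or pushes the child states; duplicates are removed once per phase with dict.fromkeys instead of accumulating into a dict during the recursion.
import Mathlib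
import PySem

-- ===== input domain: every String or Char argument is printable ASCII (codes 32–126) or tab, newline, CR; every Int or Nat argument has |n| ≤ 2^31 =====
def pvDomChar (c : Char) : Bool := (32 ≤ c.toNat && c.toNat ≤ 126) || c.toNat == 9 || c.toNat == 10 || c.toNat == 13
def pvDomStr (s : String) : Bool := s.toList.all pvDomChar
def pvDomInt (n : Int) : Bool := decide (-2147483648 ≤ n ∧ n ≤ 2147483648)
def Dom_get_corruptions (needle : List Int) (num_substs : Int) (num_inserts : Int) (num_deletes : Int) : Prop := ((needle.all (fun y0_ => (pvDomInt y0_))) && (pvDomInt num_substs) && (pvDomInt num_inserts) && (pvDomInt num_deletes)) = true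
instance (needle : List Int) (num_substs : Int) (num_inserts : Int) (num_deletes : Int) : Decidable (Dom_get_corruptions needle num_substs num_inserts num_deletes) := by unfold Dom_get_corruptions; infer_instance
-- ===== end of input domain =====

-- B replaces A's dict-mutating recursions by explicit stack/worklist loops per phase and a single
-- first-occurrence dedup (dict.fromkeys) between phases; objective: alternative decomposition, same result.

-- ===== PORT A =====
-- Fuel is a totality guard only: each Python recursion terminates because pos reaches
-- min(maxpos, len); the fuel supplied at every call site strictly exceeds the recursion depth.
-- `l.getD pos 0` ports `in_list[pos]`; pos < len at every evaluation of it (pos < min maxpos len).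
def subA : Nat → List Int → Int → Nat → Nat → PySem.Dict (List Int) Bool → PySem.Dict (List Int) Bool
  | 0, _, _, _, _, d => d
  | fuel+1, l, s, pos, maxpos, d =>
    if pos = min maxpos l.length ∨ s = 0 then d.insert l true
    else
      -- for i in range(-1, 3): i = -1 recurses without substituting; i == l[pos] is skipped;
      -- in_list is restored afterwards, so the port is pure in l.
      ([-1, 0, 1, 2] : List Int).foldl (fun acc i =>
        if i = -1 then subA fuel l s (pos+1) maxpos acc
        else if i = l.getD pos 0 then acc
        else subA fuel (l.set pos i) (s-1) (pos+1) maxpos acc) d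

def insA : Nat → List Int → Int → Nat → Nat → PySem.Dict (List Int) Bool → PySem.Dict (List Int) Bool
  | 0, _, _, _, _, d => d
  | fuel+1, l, b, pos, maxpos, d =>
    if b = 0 ∨ pos = min maxpos l.length then d.insert l true
    else
      let d1 := insA fuel l b (pos+1) maxpos d
      ([0, 1, 2] : List Int).foldl
        (fun acc i => insA fuel (l.take pos ++ [i] ++ l.drop pos) (b-1) (pos+1) maxpos acc) d1

def delA : Nat → List Int → Int → Nat → Nat → PySem.Dict (List Int) Bool → PySem.Dict (List Int) Bool
  | 0, _, _, _, _, d => d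
  | fuel+1, l, b, pos, maxpos, d =>
    if b = 0 ∨ pos = min maxpos l.length then d.insert l true
    else delA fuel (l.take pos ++ l.drop (pos+1)) (b-1) pos maxpos (delA fuel l b (pos+1) maxpos d)

def get_corruptions (needle : List Int) (num_substs : Int) (num_inserts : Int) (num_deletes : Int) : List (List Int × Bool) :=
  let out0 := subA (needle.length + 1) needle num_substs 0 needle.length PySem.Dict.empty
  let out1 := out0.keys.foldl (fun d t => insA (t.length + 1) t num_inserts 0 t.length d) PySem.Dict.empty
  let out2 := out1.keys.foldl (fun d t => delA (2 * t.length + 1) t num_deletes 0 t.length d) PySem.Dict.empty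
  out2.items

-- ===== PORT B =====
-- Fuel bound on the number of worklist iterations (totality guard only; the search tree of a
-- state at position pos has < 5^(2*len+1) nodes).
def pvFuel (n : Nat) : Nat := 5 ^ (2 * n + 1)

-- while stack: pop; emit on budget==0 or pos==min(maxpos,len); else push the children (reversed
-- extend + pop-from-end = prepend to a head-pop stack).
def dfsB (ch : List Int → Int → Nat → List (List Int × Int × Nat)) (maxpos : Nat) :
    Nat → List (List Int × Int × Nat) → List (List Int) → List (List Int)
  | 0, _, out => out
  | _+1, [], out => out
  | fuel+1, (s, b, pos) :: rest, out =>
      if b = 0 ∨ pos = min maxpos s.length then dfsB ch maxpos fuel rest (out ++ [s])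
      else dfsB ch maxpos fuel (ch s b pos ++ rest) out

-- `s.getD pos 0` ports `s[pos]`; pos is in range on every state the loop expands.
def subCh (s : List Int) (b : Int) (pos : Nat) : List (List Int × Int × Nat) :=
  (s, b, pos + 1) :: (([0, 1, 2] : List Int).filter (fun i => i ≠ s.getD pos 0)).map
    (fun i => (s.set pos i, b - 1, pos + 1))

def insCh (s : List Int) (b : Int) (pos : Nat) : List (List Int × Int × Nat) :=
  (s, b, pos + 1) :: ([0, 1, 2] : List Int).map
    (fun i => (s.take pos ++ [i] ++ s.drop pos, b - 1, pos + 1))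

def delCh (s : List Int) (b : Int) (pos : Nat) : List (List Int × Int × Nat) :=
  [(s, b, pos + 1), (s.take pos ++ s.drop (pos+1), b - 1, pos)]

def dfsRun (ch : List Int → Int → Nat → List (List Int × Int × Nat)) (seq : List Int) (budget : Int) : List (List Int) :=
  dfsB ch seq.length (pvFuel seq.length) [(seq, budget, 0)] []

def get_corruptions_alt (needle : List Int) (num_substs : Int) (num_inserts : Int) (num_deletes : Int) : List (List Int × Bool) :=
  let subs := PySem.List.dedup (dfsRun subCh needle num_substs)
  let insL := PySem.List.dedup (subs.flatMap (fun t => dfsRun insCh t num_inserts))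
  let dels := PySem.List.dedup (insL.flatMap (fun t => dfsRun delCh t num_deletes))
  (dels.foldl (fun d t => d.insert t true) PySem.Dict.empty).items

-- ===== PRECONDITION & SPEC =====
def Spec_get_corruptions (needle : List Int) (num_substs : Int) (num_inserts : Int) (num_deletes : Int) (out : List (List Int × Bool)) : Prop := out = get_corruptions_alt needle num_substs num_inserts num_deletes
instance (needle : List Int) (num_substs : Int) (num_inserts : Int) (num_deletes : Int) (out : List (List Int × Bool)) : Decidable (Spec_get_corruptions needle num_substs num_inserts num_deletes out) := by unfold Spec_get_corruptions; infer_instance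

-- ===== CLAIM (what is proved, stated in full; the proofs are below) =====
def Claim_equal_get_corruptions : Prop := ∀ (needle : List Int) (num_substs : Int) (num_inserts : Int) (num_deletes : Int), Dom_get_corruptions needle num_substs num_inserts num_deletes → Spec_get_corruptions needle num_substs num_inserts num_deletes (get_corruptions needle num_substs num_inserts num_deletes)

-- ===== LEMMAS AND PROOFS =====

-- Pure emission streams: the leaves of each search tree in DFS preorder.
def Esub (maxpos : Nat) (l : List Int) (s : Int) (pos : Nat) : List (List Int) :=
  if s = 0 ∨ min maxpos l.length ≤ pos then [l]
  else Esub maxpos l s (pos+1) ++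
    (([0, 1, 2] : List Int).filter (fun i => i ≠ l.getD pos 0)).flatMap
      (fun i => Esub maxpos (l.set pos i) (s-1) (pos+1))
termination_by maxpos - pos
decreasing_by all_goals (simp_all; omega)


def Eins (maxpos : Nat) (l : List Int) (b : Int) (pos : Nat) : List (List Int) :=
  if b = 0 ∨ min maxpos l.length ≤ pos then [l]
  else Eins maxpos l b (pos+1) ++
    ([0, 1, 2] : List Int).flatMap (fun i => Eins maxpos (l.take pos ++ [i] ++ l.drop pos) (b-1) (pos+1))
termination_by maxpos - pos
decreasing_by all_goals (simp_all; omega)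

def Edel (maxpos : Nat) (l : List Int) (b : Int) (pos : Nat) : List (List Int) :=
  if b = 0 ∨ min maxpos l.length ≤ pos then [l]
  else Edel maxpos l b (pos+1) ++ Edel maxpos (l.take pos ++ l.drop (pos+1)) (b-1) pos
termination_by l.length + (min maxpos l.length - pos)
decreasing_by all_goals (simp_all; omega)


-- Node counts of the search trees (for fuel sufficiency of the worklist loop).
def costSub (maxpos : Nat) (l : List Int) (s : Int) (pos : Nat) : Nat :=
  if s = 0 ∨ min maxpos l.length ≤ pos then 1
  else 1 + costSub maxpos l s (pos+1) +
    ((([0, 1, 2] : List Int).filter (fun i => i ≠ l.getD pos 0)).map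
      (fun i => costSub maxpos (l.set pos i) (s-1) (pos+1))).sum
termination_by maxpos - pos
decreasing_by all_goals (simp_all; omega)

def costIns (maxpos : Nat) (l : List Int) (b : Int) (pos : Nat) : Nat :=
  if b = 0 ∨ min maxpos l.length ≤ pos then 1
  else 1 + costIns maxpos l b (pos+1) +
    (([0, 1, 2] : List Int).map (fun i => costIns maxpos (l.take pos ++ [i] ++ l.drop pos) (b-1) (pos+1))).sum
termination_by maxpos - pos
decreasing_by all_goals (simp_all; omega)

def costDel (maxpos : Nat) (l : List Int) (b : Int) (pos : Nat) : Nat :=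
  if b = 0 ∨ min maxpos l.length ≤ pos then 1
  else 1 + costDel maxpos l b (pos+1) + costDel maxpos (l.take pos ++ l.drop (pos+1)) (b-1) pos
termination_by l.length + (min maxpos l.length - pos)
decreasing_by all_goals (simp_all; omega)


def dedupF : List (List Int) → List (List Int) → List (List Int)
  | _, [] => []
  | seen, t :: ts => if seen.contains t then dedupF seen ts else t :: dedupF (seen ++ [t]) ts

lemma foldl_add_eq_dedupF : ∀ (ts seen : List (List Int)),
    ts.foldl PySem.Set.add seen = seen ++ dedupF seen ts := by
  intro ts
  induction ts with
  | nil => intro seen; simp [dedupF]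
  | cons t ts IH =>
    intro seen
    by_cases h : t ∈ seen
    · have h' : seen.contains t = true := by simpa using h
      simp [dedupF, PySem.Set.add, h, IH]
    · have h' : seen.contains t = false := by simpa using h
      simp [dedupF, PySem.Set.add, h, IH]

lemma dedup_eq_dedupF (ts : List (List Int)) : PySem.List.dedup ts = dedupF [] ts := by
  have h1 : PySem.List.dedup ts = PySem.Set.ofList ts := by simp [PySem.List.dedup_eq_ofList]
  have h2 : PySem.Set.ofList ts = ts.foldl PySem.Set.add [] := by
    simp [PySem.Set.ofList_eq_foldl]
  rw [h1, h2, foldl_add_eq_dedupF]; simp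

lemma insert_true_of_contains (d : PySem.Dict (List Int) Bool) (t : List Int)
    (hv : ∀ p ∈ d.items, p.2 = true) (h : d.contains t = true) : d.insert t true = d := by
  apply PySem.Dict.ext
  rw [PySem.Dict.items_insert_of_contains d true h]
  apply List.map_congr_left ?_ |>.trans (List.map_id _)
  intro p hp
  by_cases he : p.1 == t
  · have h1 : p.1 = t := by simpa using he
    have h2 : p.2 = true := hv p hp
    simp only [he, if_pos, id_eq]
    exact (Prod.ext h1 h2).symm
  · simp [he]

lemma foldl_ins_dedupF : ∀ (ts : List (List Int)) (d : PySem.Dict (List Int) Bool),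
    (∀ p ∈ d.items, p.2 = true) →
    (dedupF d.keys ts).foldl (fun d t => d.insert t true) d = ts.foldl (fun d t => d.insert t true) d := by
  intro ts
  induction ts with
  | nil => intro d _; simp [dedupF]
  | cons t ts IH =>
    intro d hv
    by_cases h : d.keys.contains t
    · have hc : d.contains t = true := by
        rw [PySem.Dict.contains_eq_decide_mem_keys]; simpa using h
      have hm : t ∈ d.keys := by simpa using h
      rw [show dedupF d.keys (t :: ts) = dedupF d.keys ts from by simp [dedupF, hm]]
      rw [IH d hv]
      simp [List.foldl_cons, insert_true_of_contains d t hv hc]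
    · have hc : d.contains t = false := by
        rw [PySem.Dict.contains_eq_decide_mem_keys]; simpa using h
      have hm : t ∉ d.keys := by simpa using h
      rw [show dedupF d.keys (t :: ts) = t :: dedupF (d.keys ++ [t]) ts from by simp [dedupF, hm]]
      have hkeys : (d.insert t true).keys = d.keys ++ [t] :=
        PySem.Dict.keys_insert_of_not_contains d true hc
      have hv' : ∀ p ∈ (d.insert t true).items, p.2 = true := by
        intro p hp
        rcases (PySem.Dict.mem_items_insert _ _ _ _).1 hp with h1 | h1
        · simp [h1]
        · exact hv p h1.1
      simp only [List.foldl_cons]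
      rw [← hkeys, IH _ hv']

lemma foldl_flatMap' {α β δ : Type} (g : α → List β) (f : δ → β → δ) :
    ∀ (xs : List α) (d : δ), (xs.flatMap g).foldl f d = xs.foldl (fun d x => (g x).foldl f d) d := by
  intro xs
  induction xs with
  | nil => intro d; simp
  | cons x xs IH => intro d; simp [List.foldl_append, IH]

lemma dfsB_eq_flatMap
    (ch : List Int → Int → Nat → List (List Int × Int × Nat)) (maxpos : Nat)
    (E : List Int → Int → Nat → List (List Int)) (cost : List Int → Int → Nat → Nat)
    (inv : List Int → Int → Nat → Prop)
    (hbase : ∀ s b pos, inv s b pos → (b = 0 ∨ pos = min maxpos s.length) →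
      E s b pos = [s] ∧ cost s b pos = 1)
    (hstep : ∀ s b pos, inv s b pos → ¬(b = 0 ∨ pos = min maxpos s.length) →
      E s b pos = (ch s b pos).flatMap (fun st => E st.1 st.2.1 st.2.2) ∧
      cost s b pos = 1 + ((ch s b pos).map (fun st => cost st.1 st.2.1 st.2.2)).sum ∧
      ∀ st ∈ ch s b pos, inv st.1 st.2.1 st.2.2) :
    ∀ (n : Nat) (sts : List (List Int × Int × Nat)) (out : List (List Int)),
      (∀ st ∈ sts, inv st.1 st.2.1 st.2.2) →
      (sts.map (fun st => cost st.1 st.2.1 st.2.2)).sum ≤ n →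
      dfsB ch maxpos n sts out = out ++ sts.flatMap (fun st => E st.1 st.2.1 st.2.2) := by
  have hone : ∀ s b pos, inv s b pos → 1 ≤ cost s b pos := by
    intro s b pos hi
    by_cases hg : b = 0 ∨ pos = min maxpos s.length
    · rw [(hbase s b pos hi hg).2]
    · rw [(hstep s b pos hi hg).2.1]; omega
  intro n
  induction n with
  | zero =>
    intro sts out hinv hsum
    match sts with
    | [] => simp [dfsB]
    | (s, b, pos) :: rest =>
      exfalso
      have h1 := hone s b pos (hinv (s, b, pos) (by simp))
      simp at hsum; omega
  | succ n IH =>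
    intro sts out hinv hsum
    match sts with
    | [] => simp [dfsB]
    | (s, b, pos) :: rest =>
      have hi : inv s b pos := hinv (s, b, pos) (by simp)
      by_cases hg : b = 0 ∨ pos = min maxpos s.length
      · obtain ⟨hE, hc⟩ := hbase s b pos hi hg
        rw [show dfsB ch maxpos (n+1) ((s, b, pos) :: rest) out
              = dfsB ch maxpos n rest (out ++ [s]) from by rw [dfsB, if_pos hg]]
        rw [IH rest (out ++ [s]) (fun st hst => hinv st (by simp [hst]))
              (by simp [hc] at hsum; omega)]
        simp [hE]
      · obtain ⟨hE, hc, hiv⟩ := hstep s b pos hi hg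
        rw [show dfsB ch maxpos (n+1) ((s, b, pos) :: rest) out
              = dfsB ch maxpos n (ch s b pos ++ rest) out from by rw [dfsB, if_neg hg]]
        rw [IH (ch s b pos ++ rest) out
              (by intro st hst; rcases List.mem_append.1 hst with h | h
                  exacts [hiv st h, hinv st (by simp [h])])
              (by simp only [List.map_append, List.sum_append]
                  simp only [List.map_cons, List.sum_cons] at hsum; omega)]
        simp [hE]


lemma subA_eq (maxpos : Nat) : ∀ (fuel : Nat) (l : List Int) (s : Int) (pos : Nat)
    (d : PySem.Dict (List Int) Bool),
    pos ≤ min maxpos l.length → maxpos - pos < fuel →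
    subA fuel l s pos maxpos d = (Esub maxpos l s pos).foldl (fun d t => d.insert t true) d := by
  intro fuel
  induction fuel with
  | zero => intro l s pos d _ hf; omega
  | succ fuel IH =>
    intro l s pos d hpos hf
    by_cases hg : pos = min maxpos l.length ∨ s = 0
    · have hg' : s = 0 ∨ min maxpos l.length ≤ pos := by omega
      rw [show subA (fuel+1) l s pos maxpos d = d.insert l true from by rw [subA, if_pos hg]]
      rw [Esub, if_pos hg']
      simp
    · have hg' : ¬ (s = 0 ∨ min maxpos l.length ≤ pos) := by omega
      have hlt : pos < min maxpos l.length := by omega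
      have e1 : ∀ (acc : PySem.Dict (List Int) Bool),
          subA fuel l s (pos+1) maxpos acc
            = (Esub maxpos l s (pos+1)).foldl (fun d t => d.insert t true) acc := by
        intro acc
        exact IH l s (pos+1) acc (by omega) (by have := Nat.min_le_left maxpos l.length; omega)
      have e2 : ∀ (i : Int) (acc : PySem.Dict (List Int) Bool),
          subA fuel (l.set pos i) (s-1) (pos+1) maxpos acc
            = (Esub maxpos (l.set pos i) (s-1) (pos+1)).foldl (fun d t => d.insert t true) acc := by
        intro i acc
        exact IH (l.set pos i) (s-1) (pos+1) acc
          (by simp only [List.length_set]; omega)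
          (by have := Nat.min_le_left maxpos l.length; omega)
      rw [Esub, if_neg hg']
      rw [show subA (fuel+1) l s pos maxpos d
            = ([-1, 0, 1, 2] : List Int).foldl (fun acc i =>
                if i = -1 then subA fuel l s (pos+1) maxpos acc
                else if i = l.getD pos 0 then acc
                else subA fuel (l.set pos i) (s-1) (pos+1) maxpos acc) d from by
            rw [subA, if_neg hg]]
      generalize l.getD pos 0 = x
      by_cases h0 : x = 0 <;>
      by_cases h1 : x = 1 <;>
      by_cases h2 : x = 2 <;>
        (try (exfalso; omega)) <;>
        simp [List.foldl_cons, List.foldl_nil, List.filter_nil,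
          List.flatMap_cons, List.flatMap_nil, List.foldl_append, e1, e2, h0, h1, h2, eq_comm]


lemma insA_eq (maxpos : Nat) : ∀ (fuel : Nat) (l : List Int) (b : Int) (pos : Nat)
    (d : PySem.Dict (List Int) Bool),
    pos ≤ min maxpos l.length → maxpos - pos < fuel →
    insA fuel l b pos maxpos d = (Eins maxpos l b pos).foldl (fun d t => d.insert t true) d := by
  intro fuel
  induction fuel with
  | zero => intro l b pos d _ hf; omega
  | succ fuel IH =>
    intro l b pos d hpos hf
    have hmm := Nat.min_le_left maxpos l.length
    have hml := Nat.min_le_right maxpos l.length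
    by_cases hg : b = 0 ∨ pos = min maxpos l.length
    · have hg' : b = 0 ∨ min maxpos l.length ≤ pos := by omega
      rw [show insA (fuel+1) l b pos maxpos d = d.insert l true from by rw [insA, if_pos hg]]
      rw [Eins, if_pos hg']
      simp
    · have hg' : ¬ (b = 0 ∨ min maxpos l.length ≤ pos) := by omega
      have hlt : pos < min maxpos l.length := by omega
      have e1 : ∀ (acc : PySem.Dict (List Int) Bool),
          insA fuel l b (pos+1) maxpos acc
            = (Eins maxpos l b (pos+1)).foldl (fun d t => d.insert t true) acc := by
        intro acc; exact IH l b (pos+1) acc (by omega) (by omega)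
      have e2 : ∀ (i : Int) (acc : PySem.Dict (List Int) Bool),
          insA fuel (l.take pos ++ i :: l.drop pos) (b-1) (pos+1) maxpos acc
            = (Eins maxpos (l.take pos ++ i :: l.drop pos) (b-1) (pos+1)).foldl
                (fun d t => d.insert t true) acc := by
        intro i acc
        refine IH (l.take pos ++ i :: l.drop pos) (b-1) (pos+1) acc ?_ (by omega)
        simp only [List.length_append, List.length_take, List.length_drop, List.length_cons]
        omega
      rw [Eins, if_neg hg']
      rw [show insA (fuel+1) l b pos maxpos d
            = ([0, 1, 2] : List Int).foldl
                (fun acc i => insA fuel (l.take pos ++ [i] ++ l.drop pos) (b-1) (pos+1) maxpos acc)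
                (insA fuel l b (pos+1) maxpos d) from by rw [insA, if_neg hg]]
      simp [List.foldl_cons, List.flatMap_cons, List.flatMap_nil,
        List.foldl_append, e1, e2]

lemma delA_eq (maxpos : Nat) : ∀ (fuel : Nat) (l : List Int) (b : Int) (pos : Nat)
    (d : PySem.Dict (List Int) Bool),
    pos ≤ min maxpos l.length → l.length + (min maxpos l.length - pos) < fuel →
    delA fuel l b pos maxpos d = (Edel maxpos l b pos).foldl (fun d t => d.insert t true) d := by
  intro fuel
  induction fuel with
  | zero => intro l b pos d _ hf; omega
  | succ fuel IH =>
    intro l b pos d hpos hf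
    have hmm := Nat.min_le_left maxpos l.length
    have hml := Nat.min_le_right maxpos l.length
    by_cases hg : b = 0 ∨ pos = min maxpos l.length
    · have hg' : b = 0 ∨ min maxpos l.length ≤ pos := by omega
      rw [show delA (fuel+1) l b pos maxpos d = d.insert l true from by rw [delA, if_pos hg]]
      rw [Edel, if_pos hg']
      simp
    · have hg' : ¬ (b = 0 ∨ min maxpos l.length ≤ pos) := by omega
      have hlt : pos < min maxpos l.length := by omega
      have hlen : (l.take pos ++ l.drop (pos+1)).length = l.length - 1 := by
        simp only [List.length_append, List.length_take, List.length_drop]; omega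
      have e1 : delA fuel l b (pos+1) maxpos d
          = (Edel maxpos l b (pos+1)).foldl (fun d t => d.insert t true) d :=
        IH l b (pos+1) d (by omega) (by omega)
      have e2 : ∀ (acc : PySem.Dict (List Int) Bool),
          delA fuel (l.take pos ++ l.drop (pos+1)) (b-1) pos maxpos acc
            = (Edel maxpos (l.take pos ++ l.drop (pos+1)) (b-1) pos).foldl
                (fun d t => d.insert t true) acc := by
        intro acc
        refine IH (l.take pos ++ l.drop (pos+1)) (b-1) pos acc ?_ ?_ <;> rw [hlen] <;> omega
      rw [Edel, if_neg hg']
      rw [show delA (fuel+1) l b pos maxpos d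
            = delA fuel (l.take pos ++ l.drop (pos+1)) (b-1) pos maxpos
                (delA fuel l b (pos+1) maxpos d) from by rw [delA, if_neg hg]]
      rw [e1, e2, List.foldl_append]

lemma costSub_le (maxpos : Nat) : ∀ (k : Nat) (l : List Int) (s : Int) (pos : Nat),
    maxpos - pos ≤ k → costSub maxpos l s pos ≤ 5 ^ (maxpos - pos) := by
  intro k
  induction k with
  | zero =>
    intro l s pos hk
    have hg : s = 0 ∨ min maxpos l.length ≤ pos := by
      have := Nat.min_le_left maxpos l.length; omega
    rw [costSub, if_pos hg]
    exact Nat.one_le_pow _ _ (by norm_num)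
  | succ k IH =>
    intro l s pos hk
    by_cases hg : s = 0 ∨ min maxpos l.length ≤ pos
    · rw [costSub, if_pos hg]; exact Nat.one_le_pow _ _ (by norm_num)
    · rw [costSub, if_neg hg]
      have hmm := Nat.min_le_left maxpos l.length
      have hlt : pos < min maxpos l.length := by omega
      have hb1 := IH l s (pos+1) (by omega)
      have hmap : ∀ x ∈ ((([0, 1, 2] : List Int).filter (fun i => i ≠ l.getD pos 0)).map
          (fun i => costSub maxpos (l.set pos i) (s-1) (pos+1))), x ≤ 5 ^ (maxpos - (pos+1)) := by
        intro x hx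
        obtain ⟨i, _, rfl⟩ := List.mem_map.1 hx
        have := IH (l.set pos i) (s-1) (pos+1) (by omega)
        simpa [List.length_set] using this
      have hsum := List.sum_le_card_nsmul _ _ hmap
      have hlenf : ((([0, 1, 2] : List Int).filter (fun i => i ≠ l.getD pos 0)).map
          (fun i => costSub maxpos (l.set pos i) (s-1) (pos+1))).length ≤ 3 := by
        simpa using List.length_filter_le (fun i => decide (i ≠ l.getD pos 0)) ([0, 1, 2] : List Int)
      rw [smul_eq_mul] at hsum
      have h3 : ((([0, 1, 2] : List Int).filter (fun i => i ≠ l.getD pos 0)).map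
          (fun i => costSub maxpos (l.set pos i) (s-1) (pos+1))).sum ≤ 3 * 5 ^ (maxpos - (pos+1)) :=
        le_trans hsum (Nat.mul_le_mul_right _ hlenf)
      have hBpos : 1 ≤ 5 ^ (maxpos - (pos+1)) := Nat.one_le_pow _ _ (by norm_num)
      have hpow : 5 ^ (maxpos - pos) = 5 * 5 ^ (maxpos - (pos+1)) := by
        rw [show maxpos - pos = (maxpos - (pos+1)) + 1 from by omega, pow_succ]; ring
      omega

lemma costIns_le (maxpos : Nat) : ∀ (k : Nat) (l : List Int) (b : Int) (pos : Nat),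
    maxpos - pos ≤ k → costIns maxpos l b pos ≤ 5 ^ (maxpos - pos) := by
  intro k
  induction k with
  | zero =>
    intro l b pos hk
    have hg : b = 0 ∨ min maxpos l.length ≤ pos := by
      have := Nat.min_le_left maxpos l.length; omega
    rw [costIns, if_pos hg]
    exact Nat.one_le_pow _ _ (by norm_num)
  | succ k IH =>
    intro l b pos hk
    by_cases hg : b = 0 ∨ min maxpos l.length ≤ pos
    · rw [costIns, if_pos hg]; exact Nat.one_le_pow _ _ (by norm_num)
    · rw [costIns, if_neg hg]
      have hmm := Nat.min_le_left maxpos l.length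
      have hlt : pos < min maxpos l.length := by omega
      have hb1 := IH l b (pos+1) (by omega)
      have hmap : ∀ x ∈ (([0, 1, 2] : List Int).map
          (fun i => costIns maxpos (l.take pos ++ [i] ++ l.drop pos) (b-1) (pos+1))),
          x ≤ 5 ^ (maxpos - (pos+1)) := by
        intro x hx
        obtain ⟨i, _, rfl⟩ := List.mem_map.1 hx
        exact IH (l.take pos ++ [i] ++ l.drop pos) (b-1) (pos+1) (by omega)
      have hsum := List.sum_le_card_nsmul _ _ hmap
      rw [smul_eq_mul] at hsum
      have hlenf : (([0, 1, 2] : List Int).map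
          (fun i => costIns maxpos (l.take pos ++ [i] ++ l.drop pos) (b-1) (pos+1))).length = 3 := by
        simp
      rw [hlenf] at hsum
      have hBpos : 1 ≤ 5 ^ (maxpos - (pos+1)) := Nat.one_le_pow _ _ (by norm_num)
      have hpow : 5 ^ (maxpos - pos) = 5 * 5 ^ (maxpos - (pos+1)) := by
        rw [show maxpos - pos = (maxpos - (pos+1)) + 1 from by omega, pow_succ]; ring
      omega

lemma costDel_le (maxpos : Nat) : ∀ (k : Nat) (l : List Int) (b : Int) (pos : Nat),
    l.length + (min maxpos l.length - pos) ≤ k →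
    costDel maxpos l b pos ≤ 5 ^ (l.length + (min maxpos l.length - pos)) := by
  intro k
  induction k with
  | zero =>
    intro l b pos hk
    have hg : b = 0 ∨ min maxpos l.length ≤ pos := by omega
    rw [costDel, if_pos hg]
    exact Nat.one_le_pow _ _ (by norm_num)
  | succ k IH =>
    intro l b pos hk
    by_cases hg : b = 0 ∨ min maxpos l.length ≤ pos
    · rw [costDel, if_pos hg]; exact Nat.one_le_pow _ _ (by norm_num)
    · rw [costDel, if_neg hg]
      have hmm := Nat.min_le_left maxpos l.length
      have hml := Nat.min_le_right maxpos l.length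
      have hlt : pos < min maxpos l.length := by omega
      have hlen : (l.take pos ++ l.drop (pos+1)).length = l.length - 1 := by
        simp only [List.length_append, List.length_take, List.length_drop]; omega
      have hb1 := IH l b (pos+1) (by omega)
      have hb1' : costDel maxpos l b (pos+1)
          ≤ 5 ^ (l.length + (min maxpos l.length - pos) - 1) := by
        refine le_trans hb1 (Nat.pow_le_pow_right (by norm_num) (by omega))
      have hb2 := IH (l.take pos ++ l.drop (pos+1)) (b-1) pos (by rw [hlen]; omega)
      have hb2' : costDel maxpos (l.take pos ++ l.drop (pos+1)) (b-1) pos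
          ≤ 5 ^ (l.length + (min maxpos l.length - pos) - 1) := by
        refine le_trans hb2 (Nat.pow_le_pow_right (by norm_num) ?_)
        rw [hlen]
        have : min maxpos (l.length - 1) ≤ min maxpos l.length := by omega
        omega
      have hBpos : 1 ≤ 5 ^ (l.length + (min maxpos l.length - pos) - 1) :=
        Nat.one_le_pow _ _ (by norm_num)
      have hpow : 5 ^ (l.length + (min maxpos l.length - pos))
          = 5 * 5 ^ (l.length + (min maxpos l.length - pos) - 1) := by
        generalize hB : l.length + (min maxpos l.length - pos) - 1 = B
        rw [show l.length + (min maxpos l.length - pos) = B + 1 from by omega, pow_succ,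
          Nat.mul_comm]
      omega


lemma dfsRun_sub (t : List Int) (b : Int) : dfsRun subCh t b = Esub t.length t b 0 := by
  have h := dfsB_eq_flatMap subCh t.length (Esub t.length) (costSub t.length)
    (fun s _ pos => pos ≤ min t.length s.length)
    (by
      intro s b pos hi hg
      have hg' : b = 0 ∨ min t.length s.length ≤ pos := by omega
      constructor
      · rw [Esub, if_pos hg']
      · rw [costSub, if_pos hg'])
    (by
      intro s b pos hi hg
      have hg' : ¬ (b = 0 ∨ min t.length s.length ≤ pos) := by omega
      have hlt : pos < min t.length s.length := by omega
      refine ⟨?_, ?_, ?_⟩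
      · rw [Esub, if_neg hg']
        simp [subCh, List.flatMap_map]
      · rw [costSub, if_neg hg']
        simp [subCh, List.map_map, Function.comp_def]
        omega
      · intro st hst
        simp only [subCh, List.mem_cons, List.mem_map] at hst
        rcases hst with rfl | ⟨i, _, rfl⟩
        · simpa using (by omega : pos + 1 ≤ min t.length s.length)
        · simpa [List.length_set] using (by omega : pos + 1 ≤ min t.length s.length))
    (pvFuel t.length) [(t, b, 0)] [] (by simp)
    (by
      have h1 := costSub_le t.length t.length t b 0 (by omega)
      have h2 : (5:Nat) ^ (t.length - 0) ≤ pvFuel t.length := by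
        unfold pvFuel
        exact Nat.pow_le_pow_right (by norm_num) (by omega)
      simp only [List.map_cons, List.map_nil, List.sum_cons, List.sum_nil]
      omega)
  simpa [dfsRun] using h

lemma dfsRun_ins (t : List Int) (b : Int) : dfsRun insCh t b = Eins t.length t b 0 := by
  have h := dfsB_eq_flatMap insCh t.length (Eins t.length) (costIns t.length)
    (fun s _ pos => pos ≤ min t.length s.length)
    (by
      intro s b pos hi hg
      have hg' : b = 0 ∨ min t.length s.length ≤ pos := by omega
      constructor
      · rw [Eins, if_pos hg']
      · rw [costIns, if_pos hg'])
    (by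
      intro s b pos hi hg
      have hg' : ¬ (b = 0 ∨ min t.length s.length ≤ pos) := by omega
      have hlt : pos < min t.length s.length := by omega
      have hml := Nat.min_le_right t.length s.length
      refine ⟨?_, ?_, ?_⟩
      · rw [Eins, if_neg hg']
        simp [insCh]
      · rw [costIns, if_neg hg']
        simp [insCh]
        omega
      · intro st hst
        simp only [insCh, List.mem_cons, List.mem_map] at hst
        rcases hst with rfl | ⟨i, _, rfl⟩
        · simpa using (by omega : pos + 1 ≤ min t.length s.length)
        · have hlen : (s.take pos ++ [i] ++ s.drop pos).length = s.length + 1 := by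
            simp only [List.length_append, List.length_take, List.length_drop,
              List.length_cons, List.length_nil]
            omega
          simp only [hlen]
          omega)
    (pvFuel t.length) [(t, b, 0)] [] (by simp)
    (by
      have h1 := costIns_le t.length t.length t b 0 (by omega)
      have h2 : (5:Nat) ^ (t.length - 0) ≤ pvFuel t.length := by
        unfold pvFuel
        exact Nat.pow_le_pow_right (by norm_num) (by omega)
      simp only [List.map_cons, List.map_nil, List.sum_cons, List.sum_nil]
      omega)
  simpa [dfsRun] using h

lemma dfsRun_del (t : List Int) (b : Int) : dfsRun delCh t b = Edel t.length t b 0 := by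
  have h := dfsB_eq_flatMap delCh t.length (Edel t.length) (costDel t.length)
    (fun s _ pos => pos ≤ min t.length s.length)
    (by
      intro s b pos hi hg
      have hg' : b = 0 ∨ min t.length s.length ≤ pos := by omega
      constructor
      · rw [Edel, if_pos hg']
      · rw [costDel, if_pos hg'])
    (by
      intro s b pos hi hg
      have hg' : ¬ (b = 0 ∨ min t.length s.length ≤ pos) := by omega
      have hlt : pos < min t.length s.length := by omega
      have hml := Nat.min_le_right t.length s.length
      refine ⟨?_, ?_, ?_⟩
      · rw [Edel, if_neg hg']
        simp [delCh]
      · rw [costDel, if_neg hg']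
        simp [delCh]
        omega
      · intro st hst
        simp only [delCh, List.mem_cons, List.not_mem_nil, or_false] at hst
        rcases hst with rfl | rfl
        · simpa using (by omega : pos + 1 ≤ min t.length s.length)
        · have hlen : (s.take pos ++ s.drop (pos+1)).length = s.length - 1 := by
            simp only [List.length_append, List.length_take, List.length_drop]
            omega
          simp only [hlen]
          have : min t.length (s.length - 1) ≤ min t.length s.length := by omega
          omega)
    (pvFuel t.length) [(t, b, 0)] [] (by simp)
    (by
      have h1 := costDel_le t.length (2 * t.length) t b 0 (by omega)
      have h2 : (5:Nat) ^ (t.length + (min t.length t.length - 0)) ≤ pvFuel t.length := by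
        unfold pvFuel
        exact Nat.pow_le_pow_right (by norm_num) (by omega)
      simp only [List.map_cons, List.map_nil, List.sum_cons, List.sum_nil]
      omega)
  simpa [dfsRun] using h

lemma subA_top (t : List Int) (b : Int) (d : PySem.Dict (List Int) Bool) :
    subA (t.length + 1) t b 0 t.length d
      = (Esub t.length t b 0).foldl (fun d t => d.insert t true) d :=
  subA_eq t.length (t.length + 1) t b 0 d (by simp) (by omega)

lemma insA_top (t : List Int) (b : Int) (d : PySem.Dict (List Int) Bool) :
    insA (t.length + 1) t b 0 t.length d
      = (Eins t.length t b 0).foldl (fun d t => d.insert t true) d :=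
  insA_eq t.length (t.length + 1) t b 0 d (by simp) (by omega)

lemma delA_top (t : List Int) (b : Int) (d : PySem.Dict (List Int) Bool) :
    delA (2 * t.length + 1) t b 0 t.length d
      = (Edel t.length t b 0).foldl (fun d t => d.insert t true) d :=
  delA_eq t.length (2 * t.length + 1) t b 0 d (by simp) (by simp; omega)

lemma keys_fold_ins (ts : List (List Int)) :
    (ts.foldl (fun d t => d.insert t true) (PySem.Dict.empty : PySem.Dict (List Int) Bool)).keys
      = dedupF [] ts := by
  rw [PySem.Dict.keys_foldl_insert ts (fun _ _ => true) PySem.Dict.empty]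
  rw [show PySem.Set.update PySem.Dict.empty.keys ts = ts.foldl PySem.Set.add [] from by
    simp [PySem.Set.update, PySem.Dict.keys_empty]]
  rw [foldl_add_eq_dedupF]
  simp

-- ===== VERDICT (by name: the statement is the Claim_ definition above) =====
theorem get_corruptions_spec : Claim_equal_get_corruptions := by
  intro needle ns ni nd _
  unfold Spec_get_corruptions get_corruptions get_corruptions_alt
  simp only [subA_top, insA_top, delA_top, dfsRun_sub, dfsRun_ins, dfsRun_del, dedup_eq_dedupF]
  rw [keys_fold_ins]
  rw [(foldl_flatMap' (fun t => Eins t.length t ni 0) (fun d t => d.insert t true)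
        (dedupF [] (Esub needle.length needle ns 0)) PySem.Dict.empty).symm]
  rw [keys_fold_ins]
  rw [(foldl_flatMap' (fun t => Edel t.length t nd 0) (fun d t => d.insert t true)
        (dedupF [] ((dedupF [] (Esub needle.length needle ns 0)).flatMap
          (fun t => Eins t.length t ni 0))) PySem.Dict.empty).symm]
  congr 1
  rw [show ([] : List (List Int)) = (PySem.Dict.empty : PySem.Dict (List Int) Bool).keys from
        (PySem.Dict.keys_empty).symm]
  rw [foldl_ins_dedupF _ PySem.Dict.empty (by simp [PySem.Dict.empty])]
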